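-- pv_equiv track=rewrite | github.com/izlotnik/scrabble-helper | app/pattern.py | apply_top
-- ===== SOURCE A (Python) =====
-- def group_by_length(words: list[str]) -> dict[int, list[str]]:
--     """Group a flat list of words into {length: [words]} sorted by length desc."""
--     groups: dict[int, list[str]] = {}
--     for w in words:
--         groups.setdefault(len(w), []).append(w)
--     return dict(sorted(groups.items(), reverse=True))
--
-- def apply_top(
--     words: list[str],
--     top_n: int,
--     per_group: bool = False,
-- ) -> dict[int, list[str]]:
--     """
--     Apply optional top-N limit then group by word length.
--     Words are already sorted alphabetically by find_by_pattern().
--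
--     top_n=0        — no limit
--     per_group=False — take the first N words overall (alphabetical), then group
--     per_group=True  — group first, keep first N per length bucket
--     """
--     if per_group:
--         grouped = group_by_length(words)
--         if top_n:
--             grouped = {k: v[:top_n] for k, v in grouped.items()}
--         return grouped
--     else:
--         if top_n:
--             words = words[:top_n]
--         return group_by_length(words)
-- ===== SOURCE B (Python) =====
-- def apply_top(
--     words: list[str],
--     top_n: int,
--     per_group: bool = False,
-- ) -> dict[int, list[str]]:
--     # Sort-then-scan: one stable sort by descending length, then split the
--     # sorted list into consecutive equal-length runs (no hash accumulation).
--     if not per_group and top_n: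
--         words = words[:top_n]
--     ordered = sorted(words, key=lambda w: -len(w))
--     out: dict[int, list[str]] = {}
--     i, n = 0, len(ordered)
--     while i < n:
--         length = len(ordered[i])
--         j = i + 1
--         while j < n and len(ordered[j]) == length:
--             j += 1
--         bucket = ordered[i:j]
--         if per_group and top_n:
--             bucket = bucket[:top_n]
--         out[length] = bucket
--         i = j
--     return out
-- ===== Notes on version B (the rewrite author's own statement) =====
-- stated objective: alternative
-- what changed: Replaces A's setdefault hash-map accumulation followed by sorting the dict items with a single stable sort by descending length and one linear scan that splits the sorted list into consecutive equal-length runs.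
import Mathlib
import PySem

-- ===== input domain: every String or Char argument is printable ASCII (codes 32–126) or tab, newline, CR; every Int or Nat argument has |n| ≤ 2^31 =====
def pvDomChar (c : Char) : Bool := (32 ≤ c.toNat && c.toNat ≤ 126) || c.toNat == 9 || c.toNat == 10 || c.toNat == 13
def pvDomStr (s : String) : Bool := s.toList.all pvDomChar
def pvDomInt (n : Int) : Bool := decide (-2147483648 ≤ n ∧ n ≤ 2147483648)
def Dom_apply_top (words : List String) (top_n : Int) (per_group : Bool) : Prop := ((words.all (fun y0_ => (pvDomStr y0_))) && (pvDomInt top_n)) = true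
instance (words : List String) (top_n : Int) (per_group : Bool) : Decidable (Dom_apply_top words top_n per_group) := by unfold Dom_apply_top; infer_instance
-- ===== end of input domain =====

-- B replaces A's dict-accumulation-then-sort-keys grouping by one stable sort by
-- descending length plus a linear scan into consecutive equal-length runs (alternative).


-- ===== PORT A =====
-- groups.setdefault(len(w), []).append(w) sets groups[len(w)] = groups.get(len(w), []) + [w]
-- with the key keeping its first-insertion position: exactly PySem.Dict.modify.
-- sorted(groups.items(), reverse=True) compares (key, value) tuples; the keys are the
-- distinct dict keys, so it is the stable descending sort by the first component.
def group_by_length (words : List String) : List (Int × List String) :=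
  let groups : PySem.Dict Int (List String) :=
    words.foldl (fun d w => d.modify (PySem.Str.len w) [] (fun v => v ++ [w])) PySem.Dict.empty
  PySem.List.sorted groups.items (fun p => p.1) true

def apply_top (words : List String) (top_n : Int) (per_group : Bool) : List (Int × List String) :=
  if per_group then
    let grouped := group_by_length words
    if top_n ≠ 0 then
      grouped.map (fun p => (p.1, PySem.List.slice p.2 none (some top_n)))
    else grouped
  else
    let words := if top_n ≠ 0 then PySem.List.slice words none (some top_n) else words
    group_by_length words

-- ===== PORT B =====
-- the two while loops of Source B: split the sorted list into consecutive runs of equal length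
def bRuns : List String → List (Int × List String)
  | [] => []
  | w :: rest =>
      (PySem.Str.len w, w :: rest.takeWhile (fun x => PySem.Str.len x == PySem.Str.len w)) ::
        bRuns (rest.dropWhile (fun x => PySem.Str.len x == PySem.Str.len w))
  termination_by l => l.length
  decreasing_by
    simp only [List.length_cons]
    exact Nat.lt_succ_of_le (List.Sublist.length_le (List.dropWhile_sublist _))

def apply_top_alt (words : List String) (top_n : Int) (per_group : Bool) : List (Int × List String) :=
  let words := if per_group = false ∧ top_n ≠ 0 then PySem.List.slice words none (some top_n) else words
  let ordered := PySem.List.sorted words (fun w => -(PySem.Str.len w)) false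
  (bRuns ordered).map (fun p =>
    (p.1, if per_group = true ∧ top_n ≠ 0 then PySem.List.slice p.2 none (some top_n) else p.2))

-- ===== PRECONDITION & SPEC =====
def Spec_apply_top (words : List String) (top_n : Int) (per_group : Bool) (out : List (Int × List String)) : Prop := out = apply_top_alt words top_n per_group
instance (words : List String) (top_n : Int) (per_group : Bool) (out : List (Int × List String)) : Decidable (Spec_apply_top words top_n per_group out) := by unfold Spec_apply_top; infer_instance

-- ===== CLAIM (what is proved, stated in full; the proofs are below) =====
def Claim_equal_apply_top : Prop := ∀ (words : List String) (top_n : Int) (per_group : Bool), Dom_apply_top words top_n per_group → Spec_apply_top words top_n per_group (apply_top words top_n per_group)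

-- ===== LEMMAS AND PROOFS =====

-- the common canonical form: distinct lengths sorted descending, each paired with
-- the words of that length in their original order
def pvKeysOf (ws : List String) : List Int :=
  PySem.List.sorted (PySem.Set.ofList (ws.map PySem.Str.len)) (fun k => k) true

def pvCanon (ws : List String) : List (Int × List String) :=
  (pvKeysOf ws).map (fun k => (k, ws.filter (fun w => PySem.Str.len w == k)))

-- ===== A side =====
lemma groupA_canon (ws : List String) : group_by_length ws = pvCanon ws := by
  show PySem.List.sorted
      (ws.foldl (fun d w => d.modify (PySem.Str.len w) [] (fun v => v ++ [w]))
        PySem.Dict.empty).items (fun p => p.1) true = pvCanon ws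
  set groups := ws.foldl (fun d w => d.modify (PySem.Str.len w) [] (fun v => v ++ [w]))
      PySem.Dict.empty with hg
  have hkeys : groups.keys = PySem.Set.ofList (ws.map PySem.Str.len) := by
    rw [hg, PySem.Dict.keys_foldl_modify_key, PySem.Dict.keys_empty, PySem.Set.update_nil_left]
  have hnd : groups.keys.Nodup := by
    rw [hkeys]; exact PySem.Set.nodup_ofList _
  have hgetD : ∀ c, groups.getD c [] = ws.filter (fun w => PySem.Str.len w == c) := by
    intro c
    have h1 : groups = (ws.map (fun w => (PySem.Str.len w, w))).foldl
        (fun d p => d.modify p.1 [] (fun v => v ++ [p.2])) PySem.Dict.empty := by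
      rw [hg, List.foldl_map]
    rw [h1, PySem.Dict.getD_foldl_modify_append, List.filter_map, List.map_map]
    simp [Function.comp_def]
  have hitems : groups.items = (PySem.Set.ofList (ws.map PySem.Str.len)).map
      (fun k => (k, ws.filter (fun w => PySem.Str.len w == k))) := by
    rw [PySem.Dict.items_eq_map_keys groups hnd [], hkeys]
    exact List.map_congr_left (fun k _ => by rw [hgetD k])
  set keys0 := PySem.Set.ofList (ws.map PySem.Str.len) with hk0
  set pairfn := fun k : Int => (k, ws.filter (fun w => PySem.Str.len w == k)) with hpf
  have hsnd : (PySem.List.sorted keys0 (fun k => k) true).Nodup :=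
    (PySem.List.sorted_perm keys0 (fun k => k) true).symm.nodup (PySem.Set.nodup_ofList _)
  have hgt : (PySem.List.sorted keys0 (fun k => k) true).Pairwise (fun a b : Int => b < a) := by
    have hle := PySem.List.sorted_pairwise_rev keys0 (fun k : Int => k)
    have hne : (PySem.List.sorted keys0 (fun k => k) true).Pairwise (fun a b : Int => a ≠ b) := hsnd
    exact (hle.and hne).imp (fun h => by omega)
  have hperm : ((PySem.List.sorted keys0 (fun k => k) true).map pairfn).Perm (keys0.map pairfn) :=
    (PySem.List.sorted_perm keys0 (fun k => k) true).map pairfn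
  have hpw : ((PySem.List.sorted keys0 (fun k => k) true).map pairfn).Pairwise
      (fun a b : Int × List String => b.1 < a.1) := List.pairwise_map.mpr hgt
  rw [hitems]
  exact PySem.List.sorted_rev_eq_of_perm_of_pairwise_gt _ _ _ hperm hpw

-- ===== B side =====
lemma bRuns_cons (w : String) (rest : List String) :
    bRuns (w :: rest) =
      (PySem.Str.len w,
        w :: rest.takeWhile (fun x => PySem.Str.len x == PySem.Str.len w)) ::
        bRuns (rest.dropWhile (fun x => PySem.Str.len x == PySem.Str.len w)) := by
  rw [bRuns]

lemma dropWhile_cons_false {a : Type} (p : a → Bool) (l : List a) (y : a) (ys : List a)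
    (h : l.dropWhile p = y :: ys) : p y = false := by
  induction l with
  | nil => simp at h
  | cons x l ih =>
    rw [List.dropWhile_cons] at h
    split at h
    · exact ih h
    · next hp =>
      injection h with h1 _
      subst h1
      simpa using hp

-- where x inserts in a key-sorted accumulator: filtering one key class commutes
lemma insertBy_filter {a : Type} (key : a → Int) (c : Int) (x : a) (acc : List a)
    (h : acc.Pairwise (fun p q => key p ≤ key q)) :
    (PySem.List.insertBy (fun p q => decide (key p < key q)) x acc).filter (fun w => key w == c) =
      acc.filter (fun w => key w == c) ++ (if key x == c then [x] else []) := by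
  induction acc with
  | nil =>
    by_cases hxc : (key x == c) <;> simp [PySem.List.insertBy, hxc]
  | cons y ys ih =>
    rw [List.pairwise_cons] at h
    by_cases hxy : key x < key y
    · have hres : PySem.List.insertBy (fun p q => decide (key p < key q)) x (y :: ys) =
          x :: y :: ys := by simp [PySem.List.insertBy, hxy]
      rw [hres]
      by_cases hxc : (key x == c)
      · have hc : key x = c := by simpa using hxc
        have hnil : (y :: ys).filter (fun w => key w == c) = [] := by
          rw [List.filter_eq_nil_iff]
          intro a ha
          have hya : key y ≤ key a := by
            rcases List.mem_cons.mp ha with rfl | ha'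
            · exact le_refl _
            · exact h.1 a ha'
          simp only [beq_iff_eq]
          omega
        simp [hxc, hnil]
      · simp [List.filter_cons, hxc]
    · have hres : PySem.List.insertBy (fun p q => decide (key p < key q)) x (y :: ys) =
          y :: PySem.List.insertBy (fun p q => decide (key p < key q)) x ys := by
        simp [PySem.List.insertBy, hxy]
      rw [hres, List.filter_cons, List.filter_cons, ih h.2]
      by_cases hyc : (key y == c) <;> simp [hyc]

-- stability of PySem.List.sorted: filtering one key class commutes with sorting
lemma sorted_filter {a : Type} (ws : List a) (key : a → Int) (c : Int) :
    (PySem.List.sorted ws key false).filter (fun w => key w == c) =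
      ws.filter (fun w => key w == c) := by
  induction ws using List.reverseRecOn with
  | nil => simp [PySem.List.sorted]
  | append_singleton xs x ih =>
    have h1 : PySem.List.sorted (xs ++ [x]) key false =
        PySem.List.insertBy (fun p q => decide (key p < key q)) x
          (PySem.List.sorted xs key false) := by
      rw [PySem.List.sorted_eq_foldl_insertBy, PySem.List.sorted_eq_foldl_insertBy,
        List.foldl_append]
      simp
    rw [h1, insertBy_filter key c x _ (PySem.List.sorted_pairwise xs key),
      List.filter_append, ih]
    by_cases hxc : (key x == c) <;> simp [hxc]

lemma bRuns_keys_mem : ∀ (l : List String) (k : Int),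
    k ∈ (bRuns l).map Prod.fst → ∃ x ∈ l, PySem.Str.len x = k := by
  intro l
  induction l using bRuns.induct with
  | case1 => simp [bRuns]
  | case2 w rest ih =>
    intro k hk
    rw [bRuns_cons] at hk
    simp only [List.map_cons, List.mem_cons] at hk
    rcases hk with rfl | hk
    · exact ⟨w, List.mem_cons_self, rfl⟩
    · rcases ih k hk with ⟨x, hx, hxk⟩
      exact ⟨x, List.mem_cons_of_mem _ ((List.dropWhile_sublist _).subset hx), hxk⟩

lemma bRuns_desc : ∀ (l : List String),
    l.Pairwise (fun p q => PySem.Str.len q ≤ PySem.Str.len p) →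
    bRuns l = ((bRuns l).map Prod.fst).map
        (fun k => (k, l.filter (fun w => PySem.Str.len w == k)))
      ∧ ((bRuns l).map Prod.fst).Pairwise (fun p q => q < p)
      ∧ (∀ k, k ∈ (bRuns l).map Prod.fst ↔ k ∈ l.map PySem.Str.len) := by
  intro l
  induction l using bRuns.induct with
  | case1 => intro _; refine ⟨?_, ?_, ?_⟩ <;> simp [bRuns]
  | case2 w rest ih =>
    intro hp
    rw [List.pairwise_cons] at hp
    obtain ⟨hw, hrest⟩ := hp
    rw [bRuns_cons]
    set L := PySem.Str.len w with hL
    set t := rest.takeWhile (fun x => PySem.Str.len x == L) with hT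
    set d := rest.dropWhile (fun x => PySem.Str.len x == L) with hD
    have htd : t ++ d = rest := by rw [hT, hD]; exact List.takeWhile_append_dropWhile
    have hdp : d.Pairwise (fun p q => PySem.Str.len q ≤ PySem.Str.len p) :=
      hrest.sublist (hD ▸ List.dropWhile_sublist _)
    have ht : ∀ x ∈ t, PySem.Str.len x = L := by
      intro x hx
      rw [hT] at hx
      have := List.mem_takeWhile_imp hx
      simp only [beq_iff_eq] at this
      exact this
    have hdmem : ∀ x ∈ d, x ∈ rest := fun x hx =>
      (hD ▸ List.dropWhile_sublist _ : d.Sublist rest).subset hx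
    have hd : ∀ x ∈ d, PySem.Str.len x < L := by
      intro x hx
      cases hdd : d with
      | nil => rw [hdd] at hx; simp at hx
      | cons y ys =>
        have hdrop : rest.dropWhile (fun x => PySem.Str.len x == L) = y :: ys := by
          rw [← hD]; exact hdd
        have hy : (PySem.Str.len y == L) = false :=
          dropWhile_cons_false _ rest y ys hdrop
        have hyL : PySem.Str.len y < L := by
          have hyle : PySem.Str.len y ≤ L := hw y (hdmem y (hdd ▸ List.mem_cons_self))
          have hyne : PySem.Str.len y ≠ L := by simpa using hy
          omega
        have hpyys : List.Pairwise (fun p q => PySem.Str.len q ≤ PySem.Str.len p) (y :: ys) := by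
          rw [← hdd]; exact hdp
        rw [hdd] at hx
        rcases List.mem_cons.mp hx with rfl | hx'
        · exact hyL
        · have h1 : PySem.Str.len x ≤ PySem.Str.len y :=
            List.rel_of_pairwise_cons hpyys hx'
          omega
    obtain ⟨ihmap, ihpw, ihmem⟩ := ih hdp
    have hkeys : ∀ k ∈ (bRuns d).map Prod.fst, k < L := by
      intro k hk
      rcases bRuns_keys_mem d k hk with ⟨x, hx, rfl⟩
      exact hd x hx
    have hhead : (w :: rest).filter (fun x => PySem.Str.len x == L) = w :: t := by
      have h1 : t.filter (fun x => PySem.Str.len x == L) = t :=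
        List.filter_eq_self.mpr (fun a ha => by simp only [beq_iff_eq]; exact ht a ha)
      have h2 : d.filter (fun x => PySem.Str.len x == L) = [] :=
        List.filter_eq_nil_iff.mpr
          (fun a ha => by simp only [beq_iff_eq]; have := hd a ha; omega)
      have hwL : ((PySem.Str.len w == L) = true) := by rw [hL]; exact beq_self_eq_true L
      rw [List.filter_cons, ← htd, List.filter_append, h1, h2, if_pos hwL, List.append_nil]
    have htail : ∀ k ∈ (bRuns d).map Prod.fst,
        (w :: rest).filter (fun x => PySem.Str.len x == k) =
          d.filter (fun x => PySem.Str.len x == k) := by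
      intro k hk
      have hkL : k < L := hkeys k hk
      have htk : t.filter (fun x => PySem.Str.len x == k) = [] :=
        List.filter_eq_nil_iff.mpr
          (fun a ha => by simp only [beq_iff_eq]; have := ht a ha; omega)
      have hwk : ¬ ((PySem.Str.len w == k) = true) := by
        simp only [beq_iff_eq]
        rw [← hL]
        omega
      rw [List.filter_cons, ← htd, List.filter_append, htk, if_neg hwk, List.nil_append]
    refine ⟨?_, ?_, ?_⟩
    · simp only [List.map_cons]
      congr 1
      · rw [hhead]
      · conv_lhs => rw [ihmap]
        apply List.map_congr_left
        intro k hk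
        show (k, d.filter (fun w => PySem.Str.len w == k)) =
          (k, (w :: rest).filter (fun w => PySem.Str.len w == k))
        rw [htail k hk]
    · simp only [List.map_cons]
      exact List.pairwise_cons.mpr ⟨hkeys, ihpw⟩
    · intro k
      simp only [List.map_cons, List.mem_cons, ← hL]
      constructor
      · rintro (rfl | hk)
        · left; rfl
        · right
          rcases List.mem_map.mp ((ihmem k).mp hk) with ⟨x, hx, rfl⟩
          exact List.mem_map.mpr ⟨x, hdmem x hx, rfl⟩
      · rintro (rfl | hk)
        · left; rfl
        · rcases List.mem_map.mp hk with ⟨x, hx, rfl⟩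
          rw [← htd] at hx
          rcases List.mem_append.mp hx with hx' | hx'
          · left; exact ht x hx'
          · right
            exact (ihmem _).mpr (List.mem_map.mpr ⟨x, hx', rfl⟩)

lemma runsB_canon (ws : List String) :
    bRuns (PySem.List.sorted ws (fun w => -(PySem.Str.len w)) false) = pvCanon ws := by
  set l := PySem.List.sorted ws (fun w => -(PySem.Str.len w)) false with hl
  have hpl : l.Pairwise (fun p q => PySem.Str.len q ≤ PySem.Str.len p) := by
    have h0 := PySem.List.sorted_pairwise ws (fun w => -(PySem.Str.len w))
    rw [← hl] at h0
    exact h0.imp (fun h => by omega)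
  obtain ⟨hmap, hpw, hmem⟩ := bRuns_desc l hpl
  have hperm : l.Perm ws := PySem.List.sorted_perm ws _ false
  have hkeysnd : ((bRuns l).map Prod.fst).Nodup := hpw.imp (fun h => by omega)
  have hkeq : (bRuns l).map Prod.fst =
      PySem.List.sorted (PySem.Set.ofList (ws.map PySem.Str.len)) (fun k => k) true := by
    symm
    apply PySem.List.sorted_rev_eq_of_perm_of_pairwise_gt _ _ (fun k : Int => k) _ hpw
    rw [List.perm_ext_iff_of_nodup hkeysnd (PySem.Set.nodup_ofList _)]
    intro k
    rw [hmem k, PySem.Set.mem_ofList]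
    constructor
    · intro hk
      rcases List.mem_map.mp hk with ⟨x, hx, rfl⟩
      exact List.mem_map.mpr ⟨x, hperm.subset hx, rfl⟩
    · intro hk
      rcases List.mem_map.mp hk with ⟨x, hx, rfl⟩
      exact List.mem_map.mpr ⟨x, hperm.symm.subset hx, rfl⟩
  have hbeqneg : ∀ a b : Int, (a == b) = (-a == -b) := by
    intro a b
    by_cases h : a = b
    · simp [h]
    · rw [beq_eq_false_iff_ne.mpr h,
        Eq.symm (beq_eq_false_iff_ne.mpr (show (-a : Int) ≠ -b by omega))]
  have hfilt : ∀ k : Int, l.filter (fun w => PySem.Str.len w == k) =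
      ws.filter (fun w => PySem.Str.len w == k) := by
    intro k
    have hb : (fun w => PySem.Str.len w == k) =
        (fun w => (-(PySem.Str.len w) : Int) == -k) := by
      funext w; exact hbeqneg (PySem.Str.len w) k
    rw [hl, hb]
    exact sorted_filter ws (fun w => -(PySem.Str.len w)) (-k)
  rw [hmap, hkeq]
  unfold pvCanon pvKeysOf
  exact List.map_congr_left (fun k _ => by rw [hfilt k])

-- the same fact with the key written as simp normalizes it in the final goal
lemma runsB_canon2 (ws : List String) :
    bRuns (PySem.List.sorted ws (fun w => -(w.length : Int)) false) = pvCanon ws := by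
  have h : (fun w : String => -(w.length : Int)) = (fun w => -(PySem.Str.len w)) := by
    funext w; simp [PySem.Str.len_eq]
  rw [h]
  exact runsB_canon ws

-- ===== VERDICT (by name: the statement is the Claim_ definition above) =====
theorem apply_top_spec : Claim_equal_apply_top := by
  intro words top_n per_group _
  show apply_top words top_n per_group = apply_top_alt words top_n per_group
  unfold apply_top apply_top_alt
  cases per_group <;> by_cases h : top_n ≠ 0 <;>
    simp [h, groupA_canon] <;> rw [runsB_canon2]
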